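-- pv_equiv track=rewrite | github.com/mhoang17/Official-P5-Github | KnowledgeGraph/PathProcessing.py | path_sectioning
-- ===== SOURCE A (Python) =====
-- def path_sectioning(all_paths):
--     # This is a list where the list of all paths is sectioned up into pieces.
--     # (Eg. [['tom hanks', 'starred_in', 'forrest gump'], ['tom hanks', 'starred_in', 'the green mile'],...]
--     # This is necessary to do in order for all paths to be separated and therefore we are easier able to find the
--     # relevance of the path in the later stages.
--     sec_all_paths = []
--
--     # 'Part' represents a part of all paths
--     part = []
--
--     # 'entity_paths' is one entry in the 'all_paths' aka. all paths for one entity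
--     for entity_paths in all_paths:
--         for i in range(len(entity_paths)):
--             # If we find the name of the entity, we know that this is the beginning of a path.
--             if entity_paths[i] == entity_paths[0]:
--
--                 part.append(entity_paths[i])
--
--                 for j in range(i + 1, len(entity_paths)):
--                     # If we find the name again then it's the beginning of a new path and we should stop
--                     # our current path
--                     if entity_paths[j] == entity_paths[0]:
--                         break
--
--                     part.append(entity_paths[j])
--
--                 # Add the found path
--                 sec_all_paths.append(part)
--
--                 # Reset the path
--                 part = []
--
--     return sec_all_paths
-- ===== SOURCE B (Python) =====
-- def path_sectioning(all_paths):
--     # One linear pass per entity: split entity_paths into segments that each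
--     # start at an occurrence of the entity's first element.
--     sec_all_paths = []
--     for entity_paths in all_paths:
--         if not entity_paths:
--             continue
--         first = entity_paths[0]
--         part = []
--         for elem in entity_paths:
--             if elem == first:
--                 if part:
--                     sec_all_paths.append(part)
--                 part = [elem]
--             else:
--                 part.append(elem)
--         if part:
--             sec_all_paths.append(part)
--     return sec_all_paths
-- ===== Notes on version B (the rewrite author's own statement) =====
-- stated objective: faster
-- what changed: Replaced A's per-index rescan (each match re-copies the following elements via an inner break-loop while the outer loop still visits them) by a single forward pass per entity that maintains the current segment and flushes it at each new occurrence of the first element.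
import Mathlib
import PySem

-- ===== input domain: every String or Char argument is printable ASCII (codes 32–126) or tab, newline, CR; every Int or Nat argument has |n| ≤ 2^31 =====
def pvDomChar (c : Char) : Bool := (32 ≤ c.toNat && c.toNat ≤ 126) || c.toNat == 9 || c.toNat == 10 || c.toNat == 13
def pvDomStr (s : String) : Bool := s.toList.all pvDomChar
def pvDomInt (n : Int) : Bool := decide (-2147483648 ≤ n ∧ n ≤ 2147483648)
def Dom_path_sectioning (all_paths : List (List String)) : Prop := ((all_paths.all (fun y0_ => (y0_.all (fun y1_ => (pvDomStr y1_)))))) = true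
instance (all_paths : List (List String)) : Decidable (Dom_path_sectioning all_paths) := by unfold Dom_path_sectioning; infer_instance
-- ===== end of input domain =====

-- B replaces A's quadratic per-index rescan by one linear pass per entity (same output).

-- ===== PORT A =====
-- inner j-loop of A: append elements from the current position until the first
-- element is seen again (the 'break')
def pathInner (f : String) : List String → List String
  | [] => []
  | x :: xs => if x == f then [] else x :: pathInner f xs

-- body of A's i-loop; state = (sec_all_paths, part)
def stepA (e : List String) (acc : List (List String) × List String) (i : Int) :
    List (List String) × List String :=
  match PySem.List.pyGet? e i, PySem.List.pyGet? e 0 with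
  | some x, some f =>
      if x == f then (acc.1 ++ [acc.2 ++ [x] ++ pathInner f (e.drop (i.toNat + 1))], [])
      else acc
  | _, _ => acc

def path_sectioning (all_paths : List (List String)) : List (List String) :=
  (all_paths.foldl
    (fun acc e => (PySem.List.pyRange 0 e.length 1).foldl (stepA e) acc)
    ([], [])).1

-- ===== PORT B =====
-- B's inner loop: walk the entity's paths once, flushing the current part at
-- each new occurrence of the first element
def walkB (f : String) (cur : List String) : List String → List (List String)
  | [] => if cur.isEmpty then [] else [cur]
  | x :: xs =>
      if x == f then (if cur.isEmpty then [] else [cur]) ++ walkB f [x] xs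
      else walkB f (cur ++ [x]) xs

def path_sectioning_alt (all_paths : List (List String)) : List (List String) :=
  all_paths.foldl
    (fun res e => match e with
      | [] => res
      | f :: _ => res ++ walkB f [] e)
    []

-- ===== PRECONDITION & SPEC =====
def Spec_path_sectioning (all_paths : List (List String)) (out : List (List String)) : Prop := out = path_sectioning_alt all_paths
instance (all_paths : List (List String)) (out : List (List String)) : Decidable (Spec_path_sectioning all_paths out) := by unfold Spec_path_sectioning; infer_instance

-- ===== CLAIM (what is proved, stated in full; the proofs are below) =====
def Claim_equal_path_sectioning : Prop := ∀ (all_paths : List (List String)), Dom_path_sectioning all_paths → Spec_path_sectioning all_paths (path_sectioning all_paths)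

-- ===== LEMMAS AND PROOFS =====

-- the segments A produces for one entity list, as a structural recursion
def segsA (f : String) : List String → List (List String)
  | [] => []
  | x :: xs => if x == f then (x :: pathInner f xs) :: segsA f xs else segsA f xs

def dropW (f : String) (l : List String) : List String := l.dropWhile (fun y => !(y == f))

theorem segsA_dropW (f : String) (l : List String) : segsA f (dropW f l) = segsA f l := by
  induction l with
  | nil => rfl
  | cons x xs ih =>
      by_cases h : x == f
      · simp [dropW, List.dropWhile, h]
      · simp [dropW, List.dropWhile, h, segsA] at *
        exact ih

theorem walkB_nonempty (f : String) (l : List String) :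
    ∀ cur, cur ≠ [] → walkB f cur l = (cur ++ pathInner f l) :: segsA f (dropW f l) := by
  induction l with
  | nil => intro cur hc; simp [walkB, List.isEmpty_iff, hc, pathInner, dropW, segsA]
  | cons x xs ih =>
      intro cur hc
      by_cases h : x == f
      · have : dropW f (x :: xs) = x :: xs := by simp [dropW, List.dropWhile, h]
        rw [walkB, if_pos h, ih [x] (by simp), this]
        simp [List.isEmpty_iff, hc, pathInner, h, segsA, segsA_dropW]
      · have : dropW f (x :: xs) = dropW f xs := by simp [dropW, List.dropWhile, h]
        rw [walkB, if_neg h, ih (cur ++ [x]) (by simp), this]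
        simp [pathInner, h]

theorem walkB_eq_segsA (f : String) (rest : List String) :
    walkB f [] (f :: rest) = segsA f (f :: rest) := by
  rw [walkB, if_pos (by simp), walkB_nonempty f rest [f] (by simp)]
  simp [segsA, segsA_dropW]

theorem foldRange (e : List String) (f : String) (hf : PySem.List.pyGet? e 0 = some f) :
    ∀ (n k : Nat), k + n = e.length → ∀ sec,
      (PySem.List.pyRange k e.length 1).foldl (stepA e) (sec, []) =
        (sec ++ segsA f (e.drop k), []) := by
  intro n
  induction n with
  | zero =>
      intro k hk sec
      have hd : e.drop k = [] := List.drop_eq_nil_of_le (by omega)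
      have h1 : PySem.List.pyRange (k : Int) (e.length : Int) 1 = [] := by
        rw [PySem.List.pyRange_one]
        have : ((e.length : Int) - (k : Int)).toNat = 0 := by omega
        simp [this]
      simp [h1, hd, segsA]
  | succ m ih =>
      intro k hk sec
      have hlt : k < e.length := by omega
      have hcons : PySem.List.pyRange k e.length 1 =
          (k : Int) :: PySem.List.pyRange ((k : Int) + 1) e.length 1 := by
        exact PySem.List.pyRange_one_cons (by exact_mod_cast hlt)
      have hget : PySem.List.pyGet? e (k : Int) = some e[k] := by
        rw [PySem.List.pyGet?_natCast]
        simp [hlt]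
      have hdrop : e.drop k = e[k] :: e.drop (k + 1) := (List.getElem_cons_drop hlt).symm
      have hcast : ((k : Int) + 1) = ((k + 1 : Nat) : Int) := by push_cast; ring
      rw [hcons, List.foldl_cons, hcast]
      by_cases h : e[k] == f
      · have hstep : stepA e (sec, []) (k : Int) =
            (sec ++ [e[k] :: pathInner f (e.drop (k + 1))], []) := by
          simp [stepA, hget, hf, h, Int.toNat_natCast]
        rw [hstep, ih (k + 1) (by omega) _]
        rw [hdrop]
        simp [segsA, h]
      · have hstep : stepA e (sec, []) (k : Int) = (sec, []) := by
          simp [stepA, hget, hf, h]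
        rw [hstep, ih (k + 1) (by omega) sec, hdrop]
        simp [segsA, h]

theorem entity_eq (sec : List (List String)) (e : List String) :
    (PySem.List.pyRange 0 e.length 1).foldl (stepA e) (sec, []) =
      (sec ++ (match e with | [] => [] | f :: _ => walkB f [] e), []) := by
  match e with
  | [] => simp
  | f :: rest =>
      have hf : PySem.List.pyGet? (f :: rest) 0 = some f := by
        simp [PySem.List.pyGet?, PySem.List.pyIdx?]
      have h := foldRange (f :: rest) f hf (f :: rest).length 0 (by simp) sec
      rw [Nat.cast_zero] at h
      rw [h, List.drop_zero, ← walkB_eq_segsA]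

theorem fold_eq (aps : List (List String)) :
    ∀ sec,
      (aps.foldl (fun acc e => (PySem.List.pyRange 0 e.length 1).foldl (stepA e) acc) (sec, [])).1 =
        aps.foldl (fun res e => match e with | [] => res | f :: _ => res ++ walkB f [] e) sec := by
  induction aps with
  | nil => intro sec; rfl
  | cons e rest ih =>
      intro sec
      rw [List.foldl_cons, List.foldl_cons, entity_eq sec e, ih]
      match e with
      | [] => simp
      | f :: tl => rfl

-- ===== VERDICT (by name: the statement is the Claim_ definition above) =====
theorem path_sectioning_spec : Claim_equal_path_sectioning := by
  intro aps _
  show path_sectioning aps = path_sectioning_alt aps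
  unfold path_sectioning path_sectioning_alt
  exact fold_eq aps []
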